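-- pv_equiv track=rewrite | github.com/lladux/cella | core/mangeFiles.py | backDir
-- ===== SOURCE A (Python) =====
-- def backDir(ruta):
--     nruta=ruta[::-1]
--     ruta=''
--     bandera=False
--     j=-1
--     for i in nruta:
--         if bandera==True:
--             ruta=ruta+i
--         if bandera==False and(i == '/' or i =='\\'):
--             bandera=True
--         j=j-1
--     ruta= ruta[::-1]
--     return ruta
-- ===== SOURCE B (Python) =====
-- def backDir(ruta):
--     idx = max(ruta.rfind('/'), ruta.rfind('\\'))
--     return ruta[:idx] if idx != -1 else ''
-- ===== Notes on version B (the rewrite author's own statement) =====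
-- stated objective: simpler
-- what changed: Replaces the double string reversal and the character-by-character flag-driven accumulator loop with a direct rfind of the last separator ('/' or '\') and one slice of the prefix before it.
import Mathlib
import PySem

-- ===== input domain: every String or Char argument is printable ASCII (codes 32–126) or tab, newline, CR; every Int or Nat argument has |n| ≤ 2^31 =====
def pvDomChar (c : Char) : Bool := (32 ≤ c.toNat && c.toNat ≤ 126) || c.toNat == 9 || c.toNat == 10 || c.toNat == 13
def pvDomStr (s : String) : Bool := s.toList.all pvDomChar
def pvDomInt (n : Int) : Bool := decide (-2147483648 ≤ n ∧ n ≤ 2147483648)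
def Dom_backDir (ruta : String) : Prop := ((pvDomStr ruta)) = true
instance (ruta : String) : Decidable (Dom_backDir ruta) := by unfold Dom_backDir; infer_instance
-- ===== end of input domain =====

-- B replaces A's double string reversal and flag-driven accumulator loop by an rfind of the
-- last separator plus one slice (objective: simpler).

-- ===== PORT A =====
-- loop body of A: state = (ruta, bandera, j), i the current character of nruta
def backDirStep (s : List Char × Bool × Int) (i : Char) : List Char × Bool × Int :=
  let ruta := if s.2.1 then s.1 ++ [i] else s.1
  let bandera := if (!s.2.1) && (i == '/' || i == '\\') then true else s.2.1
  (ruta, bandera, s.2.2 - 1)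

-- the body of A on the character list: nruta = ruta[::-1] (PySem.List.slice?_none_none_neg_one),
-- then the for-loop, then the final ruta[::-1]
def backDirGo (l : List Char) : List Char :=
  let nruta := l.reverse
  let st := nruta.foldl backDirStep ([], false, -1)
  st.1.reverse

def backDir (ruta : String) : String :=
  String.ofList (backDirGo ruta.toList)

-- ===== PORT B =====
def backDir_alt (ruta : String) : String :=
  let idx := max (PySem.Str.rfind ruta "/") (PySem.Str.rfind ruta "\\")
  if idx ≠ -1 then PySem.Str.slice ruta none (some idx) else ""

-- ===== PRECONDITION & SPEC =====
def Spec_backDir (ruta : String) (out : String) : Prop := out = backDir_alt ruta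
instance (ruta : String) (out : String) : Decidable (Spec_backDir ruta out) := by unfold Spec_backDir; infer_instance

-- ===== CLAIM (what is proved, stated in full; the proofs are below) =====
def Claim_equal_backDir : Prop := ∀ (ruta : String), Dom_backDir ruta → Spec_backDir ruta (backDir ruta)

-- ===== LEMMAS AND PROOFS =====

-- B on the character list
def bL (l : List Char) : List Char :=
  let idx := max (PySem.Chars.rfind l ['/']) (PySem.Chars.rfind l ['\\'])
  if idx ≠ -1 then PySem.Chars.slice l none (some idx) else []

lemma backDir_alt_toList (ruta : String) : (backDir_alt ruta).toList = bL ruta.toList := by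
  simp [backDir_alt, bL, PySem.Str.rfind_eq]
  split <;> simp

-- A's fold once bandera is true: append everything, flag stays true
lemma foldl_step_true (l : List Char) (acc : List Char) (j : Int) :
    l.foldl backDirStep (acc, true, j) = (acc ++ l, true, j - l.length) := by
  induction l generalizing acc j with
  | nil => simp
  | cons c t ih => simp [List.foldl_cons, backDirStep, ih]; ring

-- the accumulated string never depends on j
lemma fst_j_irrel (l : List Char) (acc : List Char) (b : Bool) (j j' : Int) :
    (l.foldl backDirStep (acc, b, j)).1 = (l.foldl backDirStep (acc, b, j')).1 := by
  induction l generalizing acc b j j' with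
  | nil => rfl
  | cons c t ih => simp only [List.foldl_cons, backDirStep]; exact ih _ _ _ _

lemma backDirGo_append (l : List Char) (d : Char) :
    backDirGo (l ++ [d]) = if d = '/' ∨ d = '\\' then l else backDirGo l := by
  unfold backDirGo
  simp only [List.reverse_append, List.reverse_cons, List.reverse_nil, List.nil_append,
    List.singleton_append, List.foldl_cons]
  by_cases hd : d = '/' ∨ d = '\\'
  · have hstep : backDirStep ([], false, -1) d = ([], true, -2) := by
      rcases hd with h | h <;> simp [backDirStep, h]
    rw [hstep, foldl_step_true]
    simp [hd]
  · have hstep : backDirStep ([], false, -1) d = ([], false, -2) := by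
      simp [backDirStep]
      rcases Decidable.em (d = '/') with h | h
      · exact absurd (Or.inl h) hd
      · simp [h]; intro h2; exact absurd (Or.inr h2) hd
    rw [hstep, if_neg hd]
    rw [fst_j_irrel l.reverse [] false (-2) (-1)]

-- [c] is a prefix of xs ++ [d] iff of xs, when xs is nonempty
lemma singleton_isPrefixOf_append (c d : Char) (xs : List Char) (h : xs ≠ []) :
    [c].isPrefixOf (xs ++ [d]) = [c].isPrefixOf xs := by
  cases xs with
  | nil => exact absurd rfl h
  | cons x t => simp [List.isPrefixOf]

lemma go_le (s sub : List Char) (n : Nat) : PySem.Chars.rfind.go s sub n ≤ (n : Int) := by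
  induction n with
  | zero => simp [PySem.Chars.rfind.go]; split <;> simp
  | succ m ih =>
      simp only [PySem.Chars.rfind.go]
      split
      · push_cast; omega
      · exact le_trans ih (by push_cast; omega)

lemma neg_one_le_go (s sub : List Char) (n : Nat) : (-1 : Int) ≤ PySem.Chars.rfind.go s sub n := by
  induction n with
  | zero => simp [PySem.Chars.rfind.go]; split <;> simp
  | succ m ih =>
      simp only [PySem.Chars.rfind.go]
      split
      · push_cast; omega
      · exact ih

lemma go_append_of_lt (l : List Char) (d c : Char) (n : Nat) (h : n < l.length) :
    PySem.Chars.rfind.go (l ++ [d]) [c] n = PySem.Chars.rfind.go l [c] n := by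
  induction n with
  | zero =>
      have hl : l ≠ [] := by intro he; simp [he] at h
      simp [PySem.Chars.rfind.go, singleton_isPrefixOf_append c d l hl]
  | succ m ih =>
      have hdrop : (l ++ [d]).drop (m + 1) = l.drop (m + 1) ++ [d] :=
        List.drop_append_of_le_length (by omega)
      have hne : l.drop (m + 1) ≠ [] := by
        intro he
        have := congrArg List.length he
        simp at this; omega
      simp only [PySem.Chars.rfind.go, hdrop,
        singleton_isPrefixOf_append c d _ hne, ih (by omega)]

lemma rfind_append (l : List Char) (d c : Char) :
    PySem.Chars.rfind (l ++ [d]) [c] =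
      if d = c then (l.length : Int) else PySem.Chars.rfind l [c] := by
  unfold PySem.Chars.rfind
  have hlen : (l ++ [d]).length = l.length + 1 := by simp
  rw [hlen]
  have hdrop0 : (l ++ [d]).drop (l.length + 1) = [] := by
    apply List.drop_eq_nil_of_le; simp
  rw [show PySem.Chars.rfind.go (l ++ [d]) [c] (l.length + 1) =
      (if [c].isPrefixOf ((l ++ [d]).drop (l.length + 1)) then ((l.length : Int) + 1)
        else PySem.Chars.rfind.go (l ++ [d]) [c] l.length) by
    simp [PySem.Chars.rfind.go]]
  rw [hdrop0]
  simp only [List.isPrefixOf, Bool.false_eq_true, if_false]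
  cases hl : l with
  | nil =>
      subst hl
      simp [PySem.Chars.rfind.go, List.isPrefixOf]
      by_cases hdc : d = c <;> simp [hdc]
      · intro h; exact absurd h.symm hdc
  | cons x t =>
      have hlen2 : l.length = t.length + 1 := by rw [hl]; simp
      rw [← hl, hlen2]
      have hdropl : (l ++ [d]).drop (t.length + 1) = [d] := by
        rw [List.drop_append_of_le_length (by omega), List.drop_eq_nil_of_le (by omega),
          List.nil_append]
      have hdropl2 : l.drop (t.length + 1) = [] := List.drop_eq_nil_of_le (by omega)
      rw [show PySem.Chars.rfind.go (l ++ [d]) [c] (t.length + 1) =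
          (if [c].isPrefixOf ((l ++ [d]).drop (t.length + 1)) then ((t.length : Int) + 1)
            else PySem.Chars.rfind.go (l ++ [d]) [c] t.length) by
        simp [PySem.Chars.rfind.go]]
      rw [show PySem.Chars.rfind.go l [c] (t.length + 1) =
          (if [c].isPrefixOf (l.drop (t.length + 1)) then ((t.length : Int) + 1)
            else PySem.Chars.rfind.go l [c] t.length) by
        simp [PySem.Chars.rfind.go]]
      rw [hdropl, hdropl2]
      simp only [List.isPrefixOf, Bool.and_true]
      by_cases hdc : d = c
      · simp [hdc]
      · have : (c == d) = false := by simp; intro h; exact absurd h.symm hdc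
        simp [this, hdc, go_append_of_lt l d c t.length (by omega)]

lemma rfind_le_length (l : List Char) (c : Char) :
    PySem.Chars.rfind l [c] ≤ (l.length : Int) := go_le l [c] l.length

lemma neg_one_le_rfind (l : List Char) (c : Char) :
    (-1 : Int) ≤ PySem.Chars.rfind l [c] := neg_one_le_go l [c] l.length

lemma bL_append (l : List Char) (d : Char) :
    bL (l ++ [d]) = if d = '/' ∨ d = '\\' then l else bL l := by
  unfold bL
  simp only [rfind_append]
  by_cases hd : d = '/' ∨ d = '\\'
  · have hmax : max (if d = '/' then (l.length : Int) else PySem.Chars.rfind l ['/'])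
        (if d = '\\' then (l.length : Int) else PySem.Chars.rfind l ['\\']) = (l.length : Int) := by
      rcases hd with h | h
      · have h2 : d ≠ '\\' := by rw [h]; decide
        simp [h]
        exact le_trans (rfind_le_length l '\\') (le_refl _)
      · have h2 : d ≠ '/' := by rw [h]; decide
        simp [h]
        exact rfind_le_length l '/'
    rw [hmax]
    have hne : (l.length : Int) ≠ -1 := by omega
    simp only [hne, ne_eq, not_false_eq_true, if_true, if_pos hd]
    rw [PySem.Chars.slice_eq_listSlice, PySem.List.slice_to_natCast]
    exact List.take_left
  · have h1 : d ≠ '/' := fun h => hd (Or.inl h)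
    have h2 : d ≠ '\\' := fun h => hd (Or.inr h)
    simp only [h1, h2, if_false]
    set idx := max (PySem.Chars.rfind l ['/']) (PySem.Chars.rfind l ['\\']) with hidx
    by_cases hne : idx ≠ -1
    · have h0 : 0 ≤ idx := by
        have a1 := neg_one_le_rfind l '/'
        have a2 := neg_one_le_rfind l '\\'
        omega
      have hle : idx ≤ (l.length : Int) := by
        have a1 := rfind_le_length l '/'
        have a2 := rfind_le_length l '\\'
        omega
      rw [if_pos hne, if_pos hne]
      rw [PySem.Chars.slice_eq_listSlice, PySem.Chars.slice_eq_listSlice,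
        PySem.List.slice_to _ h0, PySem.List.slice_to _ h0]
      exact List.take_append_of_le_length (by omega)
    · have hidx1 : idx = -1 := not_not.mp hne
      simp [hidx1]

lemma main_list (l : List Char) : backDirGo l = bL l := by
  induction l using List.reverseRecOn with
  | nil => decide
  | append_singleton t d ih => rw [backDirGo_append, bL_append]; split <;> [rfl; exact ih]

-- ===== VERDICT (by name: the statement is the Claim_ definition above) =====
theorem backDir_spec : Claim_equal_backDir := by
  intro ruta _
  unfold Spec_backDir
  have h : (backDir ruta).toList = (backDir_alt ruta).toList := by
    rw [backDir_alt_toList, ← main_list]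
    simp [backDir]
  simpa using congrArg String.ofList h
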